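-- pv_equiv track=rewrite | github.com/alysmirnova/church_slavonic_text_recognition | segmentation/lines.py | get_walking_regions_between_lines
-- ===== SOURCE A (Python) =====
-- def get_walking_regions_between_lines(peaks):
--     hpp_clusters = []
--     cluster = []
--     for index, value in enumerate(peaks):
--         cluster.append(value)
--         if index < len(peaks)-1 and peaks[index+1] - value > 1:
--             hpp_clusters.append(cluster)
--             cluster = []
--         if index == len(peaks)-1:
--             hpp_clusters.append(cluster)
--             cluster = []
--     return hpp_clusters
-- ===== SOURCE B (Python) =====
-- def get_walking_regions_between_lines(peaks):
--     out = []
--     for v in reversed(peaks):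
--         if out and out[-1][-1] - v <= 1:
--             out[-1].append(v)
--         else:
--             out.append([v])
--     out.reverse()
--     for c in out:
--         c.reverse()
--     return out
-- ===== Notes on version B (the rewrite author's own statement) =====
-- stated objective: alternative
-- what changed: B replaces A's left-to-right enumerate loop with index lookahead (peaks[index+1]) and end-of-list flush by a single right-to-left pass that merges each value into the most recently opened cluster when the gap is <= 1 or opens a new cluster, then reverses the cluster list and each cluster once at the end.
import Mathlib
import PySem

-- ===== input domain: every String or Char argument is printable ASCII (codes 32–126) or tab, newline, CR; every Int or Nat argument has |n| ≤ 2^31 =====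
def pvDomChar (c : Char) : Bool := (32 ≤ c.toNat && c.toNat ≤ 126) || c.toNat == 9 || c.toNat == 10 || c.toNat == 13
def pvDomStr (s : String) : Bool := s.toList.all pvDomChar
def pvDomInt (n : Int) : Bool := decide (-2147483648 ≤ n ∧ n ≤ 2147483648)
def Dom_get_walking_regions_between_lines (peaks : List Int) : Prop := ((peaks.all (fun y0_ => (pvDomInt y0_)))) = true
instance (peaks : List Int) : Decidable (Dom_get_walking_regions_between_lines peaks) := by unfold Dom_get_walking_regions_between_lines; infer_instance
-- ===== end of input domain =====

-- B groups the peaks by a single right-to-left pass that merges each value into the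
-- most recent cluster (gap ≤ 1) or opens a new one, reversing once at the end,
-- instead of A's left-to-right lookahead-with-flush; objective: alternative decomposition.

-- ===== PORT A =====
-- loop body of A, one enumerate step: (hpp_clusters, cluster) -> (index, value) -> new state
def pvStepA (peaks : List Int) (st : List (List Int) × List Int) (iv : Int × Int) : List (List Int) × List Int :=
  let cluster := st.2 ++ [iv.2]
  -- peaks[index+1] is in range whenever the first conjunct holds, so getD 0 is exact
  let st1 := if iv.1 < (peaks.length : Int) - 1 ∧ (PySem.List.pyGet? peaks (iv.1 + 1)).getD 0 - iv.2 > 1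
             then (st.1 ++ [cluster], ([] : List Int)) else (st.1, cluster)
  if iv.1 = (peaks.length : Int) - 1 then (st1.1 ++ [st1.2], ([] : List Int)) else st1

def get_walking_regions_between_lines (peaks : List Int) : List (List Int) :=
  ((PySem.List.enumerate peaks).foldl (pvStepA peaks) ([], [])).1

-- ===== PORT B =====
-- loop body of B: 'if out and out[-1][-1] - v <= 1' (short-circuit 'and' rendered as a match
-- on out.getLast?; out[-1][-1] is the last element of the nonempty last cluster, so getLastD is exact)
def pvStepB' (out : List (List Int)) (v : Int) : List (List Int) :=
  match out.getLast? with
  | some c => if c.getLastD 0 - v ≤ 1 then out.dropLast ++ [c ++ [v]]   -- out[-1].append(v)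
              else out ++ [[v]]
  | none => out ++ [[v]]

def get_walking_regions_between_lines_alt (peaks : List Int) : List (List Int) :=
  ((peaks.reverse.foldl pvStepB' []).reverse).map List.reverse  -- out.reverse(); each c.reverse()

-- ===== PRECONDITION & SPEC =====
def Spec_get_walking_regions_between_lines (peaks : List Int) (out : List (List Int)) : Prop := out = get_walking_regions_between_lines_alt peaks
instance (peaks : List Int) (out : List (List Int)) : Decidable (Spec_get_walking_regions_between_lines peaks out) := by unfold Spec_get_walking_regions_between_lines; infer_instance

-- ===== CLAIM (what is proved, stated in full; the proofs are below) =====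
def Claim_equal_get_walking_regions_between_lines : Prop := ∀ (peaks : List Int), Dom_get_walking_regions_between_lines peaks → Spec_get_walking_regions_between_lines peaks (get_walking_regions_between_lines peaks)

-- ===== LEMMAS AND PROOFS =====

-- reference grouping: chunks x t = the clusters of (x :: t)
def chunks : Int → List Int → List (List Int)
  | x, [] => [[x]]
  | x, y :: t => if y - x > 1 then [x] :: chunks y t
                 else match chunks y t with
                      | c :: cs => (x :: c) :: cs
                      | [] => [[x]]

theorem chunks_cons_head : ∀ (t : List Int) (x : Int), ∃ c cs, chunks x t = (x :: c) :: cs := by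
  intro t
  induction t with
  | nil => intro x; exact ⟨[], [], rfl⟩
  | cons y t' ih =>
    intro x
    by_cases h : y - x > 1
    · exact ⟨[], chunks y t', by simp [chunks, h]⟩
    · obtain ⟨c, cs, hc⟩ := ih y
      exact ⟨y :: c, cs, by simp [chunks, h, hc]⟩

-- the mirrored step: B's reversed-representation step, seen through the final reversals
def pvStepB (out : List (List Int)) (v : Int) : List (List Int) :=
  match out with
  | c :: rest => if c.headD 0 - v ≤ 1 then PySem.List.insert c 0 v :: rest
                 else [v] :: c :: rest
  | [] => [v] :: []

def pvRevmap (out : List (List Int)) : List (List Int) := out.reverse.map List.reverse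

theorem revmap_step : ∀ (out : List (List Int)) (v : Int),
    pvRevmap (pvStepB' out v) = pvStepB (pvRevmap out) v := by
  intro out v
  rcases out.eq_nil_or_concat with h | ⟨os, c, h⟩
  · subst h; rfl
  · subst h
    have hgl : (os ++ [c]).getLast? = some c := by simp
    have hdl : (os ++ [c]).dropLast = os := by simp
    have hg : c.getLastD 0 = c.getLast?.getD 0 := by cases c using List.reverseRecOn <;> simp
    by_cases hc : c.getLastD 0 - v ≤ 1
    · have hb : c.getLast?.getD 0 ≤ 1 + v := by rw [← hg]; omega
      simp [pvStepB', pvStepB, pvRevmap, hgl, hdl, hb, PySem.List.insert_zero]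
    · have hb : ¬ (c.getLast?.getD 0 ≤ 1 + v) := by rw [← hg]; omega
      simp [pvStepB', pvStepB, pvRevmap, hgl, hb]

theorem revmap_foldl : ∀ (l : List Int) (out : List (List Int)),
    pvRevmap (l.foldl pvStepB' out) = l.foldl pvStepB (pvRevmap out) := by
  intro l
  induction l with
  | nil => intro out; rfl
  | cons v l' ih => intro out; simp only [List.foldl_cons, ih, revmap_step]

theorem B_chunks : ∀ (t : List Int) (x : Int),
    List.foldr (fun v out => pvStepB out v) [] (x :: t) = chunks x t := by
  intro t
  induction t with
  | nil => intro x; rfl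
  | cons y t' ih =>
    intro x
    obtain ⟨c, cs, hc⟩ := chunks_cons_head t' y
    show pvStepB (List.foldr (fun v out => pvStepB out v) [] (y :: t')) x = _
    rw [ih y, hc]
    by_cases h : y - x > 1
    · simp [pvStepB, chunks, h, hc]
      omega
    · simp [pvStepB, chunks, h, hc, PySem.List.insert_zero]
      omega

theorem A_loop : ∀ (t : List Int) (x : Int) (peaks : List Int) (k : Nat)
    (acc : List (List Int)) (cur : List Int) (c : List Int) (cs : List (List Int)),
    peaks.drop k = x :: t → chunks x t = c :: cs →
    (PySem.List.enumerate (x :: t) (k : Int)).foldl (pvStepA peaks) (acc, cur)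
      = (acc ++ (cur ++ c) :: cs, []) := by
  intro t
  induction t with
  | nil =>
    intro x peaks k acc cur c cs hdrop hch
    have hlen : peaks.length = k + 1 := by
      have := congrArg List.length hdrop
      simp [List.length_drop] at this
      omega
    have hk : ¬ ((k : Int) < (peaks.length : Int) - 1) := by
      rw [hlen]; push_cast; omega
    have hk2 : (k : Int) = (peaks.length : Int) - 1 := by
      rw [hlen]; push_cast; omega
    have he : c :: cs = [[x]] := by rw [← hch]; rfl
    injection he with e1 e2
    rw [PySem.List.enumerate_cons, PySem.List.enumerate_nil]
    simp only [List.foldl_cons, List.foldl_nil]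
    rw [e1, e2]
    simp [pvStepA, hk2]
  | cons y t' ih =>
    intro x peaks k acc cur c cs hdrop hch
    have hlen : peaks.length = k + 2 + t'.length := by
      have := congrArg List.length hdrop
      simp [List.length_drop] at this
      omega
    have hdrop' : peaks.drop (k + 1) = y :: t' := by
      have h1 : peaks.drop (k + 1) = (peaks.drop k).drop 1 := by rw [List.drop_drop]
      rw [h1, hdrop]; rfl
    have hget : PySem.List.pyGet? peaks ((k : Int) + 1) = some y := by
      have h1 : ((k : Int) + 1) = ((k + 1 : Nat) : Int) := by push_cast; ring
      rw [h1, PySem.List.pyGet?_natCast]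
      have h2 : peaks[k+1]? = (peaks.drop (k+1))[0]? := by rw [List.getElem?_drop]
      rw [h2, hdrop']; rfl
    have hk : (k : Int) < (peaks.length : Int) - 1 := by
      rw [hlen]; push_cast; omega
    have hk2 : ¬ ((k : Int) = (peaks.length : Int) - 1) := by
      rw [hlen]; push_cast; omega
    obtain ⟨c', cs', hc'⟩ := chunks_cons_head t' y
    have hstep : PySem.List.enumerate (y :: t') ((k : Int) + 1)
        = PySem.List.enumerate (y :: t') (((k + 1 : Nat)) : Int) := by norm_cast
    by_cases h : y - x > 1
    · -- flush: gap after x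
      have hA : pvStepA peaks (acc, cur) ((k : Int), x) = (acc ++ [cur ++ [x]], []) := by
        simp [pvStepA, hk, hk2, hget, h]
      rw [PySem.List.enumerate_cons]
      simp only [List.foldl_cons, hA]
      rw [hstep, ih y peaks (k + 1) (acc ++ [cur ++ [x]]) [] (y :: c') cs' hdrop' hc']
      have he : c :: cs = [x] :: (y :: c') :: cs' := by
        rw [← hch]; simp [chunks, h, hc']
      injection he with e1 e2
      rw [e1, e2]; simp
    · -- merge: x joins the cluster of y
      have hA : pvStepA peaks (acc, cur) ((k : Int), x) = (acc, cur ++ [x]) := by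
        simp [pvStepA, hk, hk2, hget, h]
      rw [PySem.List.enumerate_cons]
      simp only [List.foldl_cons, hA]
      rw [hstep, ih y peaks (k + 1) acc (cur ++ [x]) (y :: c') cs' hdrop' hc']
      have he : c :: cs = (x :: y :: c') :: cs' := by
        rw [← hch]; simp [chunks, h, hc']
      injection he with e1 e2
      rw [e1, e2]; simp

-- ===== VERDICT (by name: the statement is the Claim_ definition above) =====
theorem get_walking_regions_between_lines_spec : Claim_equal_get_walking_regions_between_lines := by
  intro peaks _
  unfold Spec_get_walking_regions_between_lines
  cases hp : peaks with
  | nil => rfl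
  | cons x t =>
    obtain ⟨c, cs, hc⟩ := chunks_cons_head t x
    have hB : get_walking_regions_between_lines_alt (x :: t) = chunks x t := by
      unfold get_walking_regions_between_lines_alt
      have h1 : (((x :: t).reverse.foldl pvStepB' []).reverse).map List.reverse
          = pvRevmap ((x :: t).reverse.foldl pvStepB' []) := rfl
      rw [h1, revmap_foldl]
      have h2 : pvRevmap [] = [] := rfl
      rw [h2, List.foldl_reverse, B_chunks]
    have hA : get_walking_regions_between_lines (x :: t) = chunks x t := by
      unfold get_walking_regions_between_lines
      have h0 : PySem.List.enumerate (x :: t) = PySem.List.enumerate (x :: t) ((0 : Nat) : Int) := by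
        norm_cast
      rw [h0, A_loop t x (x :: t) 0 [] [] (x :: c) cs (by simp) hc, hc]
      simp
    rw [hA, hB]
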